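-- pv_equiv track=rewrite | github.com/Apunti/covid19-kaggle | utils/read_data.py | new_paragraph
-- ===== SOURCE A (Python) =====
-- def new_paragraph(string, count):
--     if count > 4:
--         return True
--     if string[0].islower():
--         return False
--     elif not string[0].isalpha():
--         return new_paragraph(string[1:], count +1)
--     return True
-- ===== SOURCE B (Python) =====
-- def new_paragraph(string, count):
--     if count > 4:
--         return True
--     for c in string[:5 - count]:
--         if c.isalpha():
--             return c.isupper()
--     return True
-- ===== Notes on version B (the rewrite author's own statement) =====
-- stated objective: simpler
-- what changed: Replaces A's char-by-char recursion that re-slices the string each step with a single bounded slice string[:5-count] scanned for its first alphabetic character, whose case alone decides the result.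
import Mathlib
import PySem

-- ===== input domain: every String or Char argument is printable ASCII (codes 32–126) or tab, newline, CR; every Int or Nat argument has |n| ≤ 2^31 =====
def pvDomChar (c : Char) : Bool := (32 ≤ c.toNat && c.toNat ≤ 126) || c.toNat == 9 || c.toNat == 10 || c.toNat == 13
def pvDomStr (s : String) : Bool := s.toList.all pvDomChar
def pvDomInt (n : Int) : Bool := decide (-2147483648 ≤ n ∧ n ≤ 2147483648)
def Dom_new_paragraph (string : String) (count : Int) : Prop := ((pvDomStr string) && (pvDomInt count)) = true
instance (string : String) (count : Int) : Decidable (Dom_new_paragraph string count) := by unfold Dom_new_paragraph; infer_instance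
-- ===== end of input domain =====

-- B replaces A's char-by-char recursion with one bounded slice string[:5-count] scanned for its first
-- alphabetic character (objective: simpler); where A raises IndexError (excluded by Pre_) B returns True.

-- ===== PORT A =====
-- literal transliteration of A's recursion; string[0]/string[1:] become head/tail of the char list,
-- the [] case is Python's IndexError (excluded by Pre_new_paragraph; placeholder value false)
def newParaGo : List Char → Int → Bool
  | [], count => if count > 4 then true else false
  | c :: rest, count =>
    if count > 4 then true
    else if PySem.Chars.islower c then false
    else if PySem.Chars.isalpha c = false then newParaGo rest (count + 1)
    else true

def new_paragraph (string : String) (count : Int) : Bool :=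
  newParaGo string.toList count

-- ===== PORT B =====
-- Source B's for-loop over the slice: first alphabetic char decides
def altScan : List Char → Bool
  | [] => true
  | c :: rest => if PySem.Chars.isalpha c then PySem.Chars.isupper c else altScan rest

def new_paragraph_alt (string : String) (count : Int) : Bool :=
  if count > 4 then true
  else altScan (PySem.List.slice string.toList none (some (5 - count)))

-- ===== PRECONDITION & SPEC =====
-- A raises IndexError exactly when the recursion exhausts the string with count still ≤ 4,
-- i.e. count + len(string) ≤ 4 and every character is non-alphabetic; Pre_ excludes exactly those.
def Pre_new_paragraph (string : String) (count : Int) : Prop :=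
  ¬(count + (string.toList.length : Int) ≤ 4 ∧ ∀ c ∈ string.toList, PySem.Chars.isalpha c = false)
instance (string : String) (count : Int) : Decidable (Pre_new_paragraph string count) := by
  unfold Pre_new_paragraph; infer_instance

def pvWitness_new_paragraph : String × Int := ("Hello", 0)

def Spec_new_paragraph (string : String) (count : Int) (out : Bool) : Prop := out = new_paragraph_alt string count
instance (string : String) (count : Int) (out : Bool) : Decidable (Spec_new_paragraph string count out) := by unfold Spec_new_paragraph; infer_instance

-- ===== CLAIM (what is proved, stated in full; the proofs are below) =====
def Claim_equal_new_paragraph : Prop := ∀ (string : String) (count : Int), Dom_new_paragraph string count → Pre_new_paragraph string count → Spec_new_paragraph string count (new_paragraph string count)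

-- ===== LEMMAS AND PROOFS =====

theorem upper_of_alpha_not_lower {c : Char} (ha : PySem.Chars.isalpha c = true)
    (hl : PySem.Chars.islower c = false) : PySem.Chars.isupper c = true := by
  simp [PySem.Chars.isalpha, hl] at ha; exact ha

theorem not_upper_of_lower {c : Char} (hl : PySem.Chars.islower c = true) :
    PySem.Chars.isupper c = false := by
  simp [PySem.Chars.islower] at hl
  simp [PySem.Chars.isupper]
  intro h1
  exact lt_of_lt_of_le (by decide : 'Z' < 'a') hl.1

theorem alpha_of_lower {c : Char} (hl : PySem.Chars.islower c = true) :
    PySem.Chars.isalpha c = true := by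
  simp [PySem.Chars.isalpha, hl]

theorem go_eq_scan (l : List Char) (count : Int)
    (hpre : ¬(count + (l.length : Int) ≤ 4 ∧ ∀ c ∈ l, PySem.Chars.isalpha c = false)) :
    newParaGo l count = if count > 4 then true else altScan (l.take (5 - count).toNat) := by
  induction l generalizing count with
  | nil =>
    have hc : count > 4 := by
      by_contra h
      exact hpre ⟨by simpa using not_lt.mp h, by simp⟩
    simp [newParaGo, hc]
  | cons c rest ih =>
    by_cases hc : count > 4
    · simp [newParaGo, hc]
    · have htake : (c :: rest).take (5 - count).toNat = c :: rest.take (4 - count).toNat := by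
        have h5 : (5 - count).toNat = (4 - count).toNat + 1 := by omega
        simp [h5]
      by_cases hl : PySem.Chars.islower c = true
      · have ha := alpha_of_lower hl
        have hu := not_upper_of_lower hl
        simp [newParaGo, hc, hl, htake, altScan, ha, hu]
      · have hl' : PySem.Chars.islower c = false := by simpa using hl
        by_cases ha : PySem.Chars.isalpha c = true
        · have hu := upper_of_alpha_not_lower ha hl'
          simp [newParaGo, hc, hl', ha, htake, altScan, hu]
        · have ha' : PySem.Chars.isalpha c = false := by simpa using ha
          have hpre' : ¬(count + 1 + (rest.length : Int) ≤ 4 ∧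
              ∀ d ∈ rest, PySem.Chars.isalpha d = false) := by
            rintro ⟨h1, h2⟩
            refine hpre ⟨by simp; omega, ?_⟩
            intro d hd
            rcases List.mem_cons.mp hd with h | h
            · subst h; exact ha'
            · exact h2 d h
          have hrec := ih (count + 1) hpre'
          by_cases hc1 : count + 1 > 4
          · have h0 : (4 - count).toNat = 0 := by omega
            simp [newParaGo, hc, hl', ha', hrec, hc1, htake, altScan, h0]
          · have heq : (5 - (count + 1)).toNat = (4 - count).toNat := by omega
            simp [newParaGo, hc, hl', ha', hrec, hc1, htake, altScan, heq]

-- ===== VERDICT (by name: the statement is the Claim_ definition above) =====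
theorem new_paragraph_spec : Claim_equal_new_paragraph := by
  intro string count _ hpre
  unfold Spec_new_paragraph new_paragraph new_paragraph_alt
  rw [go_eq_scan string.toList count hpre]
  by_cases hc : count > 4
  · simp [hc]
  · have h5 : (0:Int) ≤ 5 - count := by omega
    rw [PySem.List.slice_to _ h5]
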